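-- pv_equiv track=rewrite | github.com/Osg523/coding_practiceOsg | 프로그래머스/0/120921. 문자열 밀기/문자열 밀기.py | solution
-- ===== SOURCE A (Python) =====
-- def solution(A, B):
--     answer = 0
--     NewA = A
--     while B != NewA:
--         answer += 1
--         NewA = A[-answer:]+A[:-answer]
--         if answer == len(A):
--             return -1
--     return answer
-- ===== SOURCE B (Python) =====
-- def solution(A, B):
--     n = len(A)
--     if len(B) != n:
--         return -1
--     if A == B:
--         return 0
--     i = (A + A).rfind(B, 1, 2 * n - 1)
--     return -1 if i == -1 else n - i
-- ===== Notes on version B (the rewrite author's own statement) =====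
-- stated objective: faster
-- what changed: Instead of rebuilding and comparing every rotation in a loop (O(n) string builds per step), B does a single substring search of B inside (A+A) with str.rfind and converts the found index into the rotation count.
import Mathlib
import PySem

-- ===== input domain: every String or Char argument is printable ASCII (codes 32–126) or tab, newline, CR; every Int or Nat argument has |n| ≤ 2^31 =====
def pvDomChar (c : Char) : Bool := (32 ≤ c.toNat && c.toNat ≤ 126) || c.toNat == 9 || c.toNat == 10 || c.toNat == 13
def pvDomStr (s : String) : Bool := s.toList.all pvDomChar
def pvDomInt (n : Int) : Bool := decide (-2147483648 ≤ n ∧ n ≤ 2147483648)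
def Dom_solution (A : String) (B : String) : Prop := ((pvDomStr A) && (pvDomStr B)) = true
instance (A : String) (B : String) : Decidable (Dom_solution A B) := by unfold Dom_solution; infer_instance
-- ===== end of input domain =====

-- B replaces A's rotate-and-compare loop by one substring search of B inside A+A (str.rfind),
-- converting the found index into the rotation count; measurably faster on large inputs.

-- ===== PORT A =====
-- the Python while-loop; fuel = len(A) bounds the iterations (answer reaches len(A) after at
-- most len(A) steps); the fuel-0 fallback is reached only where the Python loop diverges
-- (A = "" and B ≠ ""), which Pre_solution excludes.
def solutionLoop (A B : List Char) (fuel : Nat) (answer : Nat) (NewA : List Char) : Int :=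
  if B = NewA then (answer : Int)
  else
    match fuel with
    | 0 => 0
    | fuel' + 1 =>
      let answer' := answer + 1
      let NewA' := PySem.List.slice A (some (-(answer' : Int))) none ++
                   PySem.List.slice A none (some (-(answer' : Int)))
      if answer' = A.length then -1
      else solutionLoop A B fuel' answer' NewA'

def solution (A : String) (B : String) : Int :=
  solutionLoop A.toList B.toList A.toList.length 0 A.toList

-- ===== PORT B =====
-- Python: (A + A).rfind(B, 1, 2 * n - 1); string concatenation ported on code points
def solution_alt (A : String) (B : String) : Int :=
  let n : Int := PySem.Str.len A
  if PySem.Str.len B ≠ n then -1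
  else if A = B then 0
  else
    let i := PySem.Chars.rfindFrom (A.toList ++ A.toList) B.toList 1 (some (2 * n - 1))
    if i = -1 then -1 else n - i

-- ===== PRECONDITION & SPEC =====
-- Pre_ excludes only A = "" with B ≠ "": there the Python while-loop never terminates
-- (answer can never equal len(A) = 0), so A returns on exactly the admitted inputs.
def Pre_solution (A : String) (B : String) : Prop := A = "" → B = ""
instance (A : String) (B : String) : Decidable (Pre_solution A B) := by unfold Pre_solution; infer_instance
def pvWitness_solution : String × String := ("ab", "ba")

def Spec_solution (A : String) (B : String) (out : Int) : Prop := out = solution_alt A B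
instance (A : String) (B : String) (out : Int) : Decidable (Spec_solution A B out) := by unfold Spec_solution; infer_instance

-- ===== CLAIM (what is proved, stated in full; the proofs are below) =====
def Claim_equal_solution : Prop := ∀ (A : String) (B : String), Dom_solution A B → Pre_solution A B → Spec_solution A B (solution A B)

-- ===== LEMMAS AND PROOFS =====

-- right rotation of l by k places
def pvRot (l : List Char) (k : Nat) : List Char :=
  l.drop (l.length - k) ++ l.take (l.length - k)

-- first k in [n-c, n-1] (ascending) with pvRot l k = m
def pvFirst (l m : List Char) : Nat → Option Nat
  | 0 => none
  | c + 1 => if pvRot l (l.length - (c + 1)) = m then some (l.length - (c + 1)) else pvFirst l m c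

-- largest j in [0, d] with m a prefix of t.drop j (the descending scan of rfind)
def pvLargest (t m : List Char) : Nat → Option Nat
  | 0 => if m.isPrefixOf t then some 0 else none
  | d + 1 => if m.isPrefixOf (t.drop (d + 1)) then some (d + 1) else pvLargest t m d

theorem pvRot_zero (l : List Char) : pvRot l 0 = l := by
  simp [pvRot]

theorem pvRot_length (l : List Char) (k : Nat) : (pvRot l k).length = l.length := by
  simp [pvRot]

theorem go_eq (t m : List Char) : ∀ d : Nat,
    PySem.Chars.rfind.go t m d = (pvLargest t m d).elim (-1) (fun j => (j : Int)) := by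
  intro d
  induction d with
  | zero =>
    simp only [PySem.Chars.rfind.go, pvLargest]
    split <;> simp
  | succ d ih =>
    simp only [PySem.Chars.rfind.go, pvLargest]
    split <;> simp [ih]

theorem loop_eq (l m : List Char) : ∀ (fuel k : Nat), fuel + k = l.length → 1 ≤ fuel →
    solutionLoop l m fuel k (pvRot l k) = (pvFirst l m fuel).elim (-1) (fun j => (j : Int)) := by
  intro fuel
  induction fuel with
  | zero => intro k h h1; omega
  | succ f ih =>
    intro k hk _
    have hk' : l.length - (f + 1) = k := by omega
    simp only [solutionLoop, pvFirst, hk']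
    by_cases hc : m = pvRot l k
    · simp [hc]
    · have hc' : ¬ (pvRot l k = m) := fun h => hc h.symm
      simp only [if_neg hc, if_neg hc']
      rw [PySem.List.slice_from_neg_natCast l (k + 1) (by omega),
          PySem.List.slice_to_neg_natCast l (k + 1) (by omega)]
      by_cases he : k + 1 = l.length
      · have hf : f = 0 := by omega
        subst hf
        simp [he, pvFirst]
      · have hf : 1 ≤ f := by omega
        simp only [if_neg he]
        exact ih (k + 1) (by omega) hf

theorem pvFirst_stable (l m : List Char) (hne : m ≠ l) :
    ∀ c, l.length ≤ c → pvFirst l m c = pvFirst l m l.length := by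
  intro c
  induction c with
  | zero => intro h; have : l.length = 0 := by omega
            rw [this]
  | succ c ih =>
    intro h
    rcases Nat.lt_or_ge c l.length with h1 | h1
    · have : l.length = c + 1 := by omega
      rw [this]
    · have h0 : l.length - (c + 1) = 0 := by omega
      have hcond : ¬ (pvRot l (l.length - (c + 1)) = m) := by
        rw [h0, pvRot_zero]; exact fun h => hne h.symm
      simp only [pvFirst, if_neg hcond]
      exact ih h1

theorem pvFirst_none_of_length (l m : List Char) (hlen : m.length ≠ l.length) :
    ∀ c, pvFirst l m c = none := by
  intro c
  induction c with
  | zero => rfl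
  | succ c ih =>
    have : pvRot l (l.length - (c+1)) ≠ m := fun h => hlen (by rw [← h, pvRot_length])
    simp [pvFirst, ih]
    intro h; exact this h

-- pointwise: a match of m at offset j of the searched window is a match of the rotation n-1-j
theorem qp (l m : List Char) (hm : m.length = l.length) (hne : m ≠ l) :
    ∀ j : Nat, m.isPrefixOf ((List.drop 1 (List.take (2 * l.length - 1) (l ++ l))).drop j)
      = decide (pvRot l (l.length - 1 - j) = m) := by
  intro j
  have hn : 1 ≤ l.length := by
    rcases Nat.eq_zero_or_pos l.length with h0 | h
    · exfalso
      apply hne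
      have hl := List.length_eq_zero_iff.mp h0
      have hm0 := List.length_eq_zero_iff.mp (by omega : m.length = 0)
      rw [hl, hm0]
    · exact h
  rw [Bool.eq_iff_iff, List.isPrefixOf_iff_prefix, decide_eq_true_eq]
  rw [List.drop_drop, List.drop_take]
  by_cases hj : j + 1 ≤ l.length - 1
  · have hlen2 : m.length ≤ 2 * l.length - 1 - (1 + j) := by omega
    rw [List.prefix_take_iff, and_iff_left hlen2]
    rw [List.drop_append]
    have h0 : 1 + j - l.length = 0 := by omega
    rw [h0, List.drop_zero]
    rw [List.prefix_iff_eq_take, hm]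
    rw [List.take_append]
    rw [List.take_of_length_le (by simp)]
    have h2 : l.length - (List.drop (1 + j) l).length = 1 + j := by
      simp; omega
    rw [h2]
    unfold pvRot
    have h3 : l.length - (l.length - 1 - j) = 1 + j := by omega
    rw [h3]
    constructor <;> (intro h; exact h.symm)
  · have hr : l.length - 1 - j = 0 := by omega
    rw [hr, pvRot_zero]
    constructor
    · intro hpre
      exfalso
      have hlen := hpre.length_le
      simp at hlen
      omega
    · intro h; exact absurd h.symm hne

theorem bridge (l m : List Char) (hm : m.length = l.length) (hne : m ≠ l) :
    ∀ d : Nat, (pvLargest (List.drop 1 (List.take (2 * l.length - 1) (l ++ l))) m d).map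
        (fun j => l.length - 1 - j) = pvFirst l m (d + 1) := by
  intro d
  induction d with
  | zero =>
    have h0 := qp l m hm hne 0
    rw [List.drop_zero] at h0
    simp only [pvLargest, pvFirst]
    rw [h0]
    have e : l.length - (0 + 1) = l.length - 1 - 0 := by omega
    rw [e]
    simp
  | succ d ih =>
    have hq := qp l m hm hne (d + 1)
    simp only [pvLargest, pvFirst]
    rw [hq]
    have e : l.length - (d + 1 + 1) = l.length - 1 - (d + 1) := by omega
    rw [e]
    by_cases hc : pvRot l (l.length - 1 - (d + 1)) = m
    · simp [hc]
    · rw [decide_eq_false hc]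
      simp only [Bool.false_eq_true, if_false, if_neg hc]
      exact ih

theorem pvLargest_some (t m : List Char) :
    ∀ d j, pvLargest t m d = some j → m.isPrefixOf (t.drop j) = true := by
  intro d
  induction d with
  | zero =>
    intro j h
    simp [pvLargest] at h
    obtain ⟨h1, h2⟩ := h; subst h2; simpa using h1
  | succ d ih =>
    intro j h
    simp only [pvLargest] at h
    split at h
    · rename_i hq; cases h; exact hq
    · exact ih j h

theorem solutionLoop_self (A B : List Char) (fuel answer : Nat) :
    solutionLoop A B fuel answer B = (answer : Int) := by
  cases fuel <;> simp [solutionLoop]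

theorem rfindFrom_eval (l m : List Char) (hn : 1 ≤ l.length) :
    PySem.Chars.rfindFrom (l ++ l) m 1 (some (2 * (l.length : Int) - 1)) =
      (if PySem.Chars.rfind (List.drop 1 (List.take (2 * l.length - 1) (l ++ l))) m = -1 then -1
       else 1 + PySem.Chars.rfind (List.drop 1 (List.take (2 * l.length - 1) (l ++ l))) m) := by
  simp only [PySem.Chars.rfindFrom, List.length_append]
  have c1 : ¬ ((((l.length + l.length : Nat) : Int)) < 2 * (l.length : Int) - 1) := by
    push_cast; omega
  have c2 : ¬ ((2 * (l.length : Int) - 1) < 0) := by omega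
  have c3 : ¬ ((1 : Int) < 0) := by omega
  have c4 : ¬ ((2 * (l.length : Int) - 1) < 1) := by omega
  simp only [if_neg c1, if_neg c2, if_neg c3, if_neg c4]
  have h1 : (1 : Int).toNat = 1 := rfl
  have h2 : (2 * (l.length : Int) - 1).toNat = 2 * l.length - 1 := by omega
  rw [h1, h2]

-- ===== VERDICT (by name: the statement is the Claim_ definition above) =====
theorem solution_spec : Claim_equal_solution := by
  intro A B _ hPre
  show solution A B = solution_alt A B
  by_cases hAB : A = B
  · subst hAB
    rw [show solution A A = solutionLoop A.toList A.toList A.toList.length 0 A.toList from rfl,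
        solutionLoop_self]
    simp [solution_alt]
  · have hml : B.toList ≠ A.toList := fun h => hAB (String.toList_inj.mp h).symm
    have hA : A ≠ "" := fun h => hAB (by rw [h, hPre h])
    have hn : 1 ≤ A.toList.length := by
      rcases Nat.eq_zero_or_pos A.toList.length with h0 | h
      · have he : A.toList = "".toList := by rw [List.length_eq_zero_iff.mp h0]; rfl
        exact absurd (String.toList_inj.mp he) hA
      · exact h
    have hA_eq : solution A B =
        (pvFirst A.toList B.toList A.toList.length).elim (-1) (fun j => (j : Int)) := by
      have h := loop_eq A.toList B.toList A.toList.length 0 (by omega) (by omega)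
      rw [pvRot_zero] at h
      exact h
    by_cases hlen : B.toList.length = A.toList.length
    · have key := bridge A.toList B.toList hlen hml (2 * A.toList.length - 2)
      have e1 : 2 * A.toList.length - 2 + 1 = 2 * A.toList.length - 1 := by omega
      rw [e1, pvFirst_stable A.toList B.toList hml (2 * A.toList.length - 1) (by omega)] at key
      simp only [solution_alt, PySem.Str.len_eq]
      rw [if_neg (by simp [hlen]), if_neg hAB]
      rw [rfindFrom_eval A.toList B.toList hn]
      simp only [PySem.Chars.rfind]
      have ht : (List.drop 1 (List.take (2 * A.toList.length - 1) (A.toList ++ A.toList))).length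
          = 2 * A.toList.length - 2 := by simp; omega
      rw [ht, go_eq]
      cases hL : pvLargest (List.drop 1 (List.take (2 * A.toList.length - 1)
          (A.toList ++ A.toList))) B.toList (2 * A.toList.length - 2) with
      | none =>
        rw [hL] at key
        simp only [Option.map_none] at key
        rw [hA_eq, ← key]
        simp
      | some j =>
        have hq := pvLargest_some _ _ _ _ hL
        rw [qp A.toList B.toList hlen hml j] at hq
        have hPj : pvRot A.toList (A.toList.length - 1 - j) = B.toList := of_decide_eq_true hq
        have hjb : j + 1 ≤ A.toList.length - 1 := by
          by_contra hge
          have h0 : A.toList.length - 1 - j = 0 := by omega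
          rw [h0, pvRot_zero] at hPj
          exact hml hPj.symm
        rw [hL] at key
        simp only [Option.map_some] at key
        rw [hA_eq, ← key]
        simp only [Option.elim]
        rw [if_neg (by omega), if_neg (by omega)]
        omega
    · have hnone := pvFirst_none_of_length A.toList B.toList hlen A.toList.length
      rw [hA_eq, hnone]
      simp only [solution_alt, PySem.Str.len_eq]
      rw [if_pos (by simpa using hlen)]
      rfl
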